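-- pv_equiv track=rewrite | github.com/jmpijll/fortimanagerpolicymerger | src/policy_merger/cli_gen.py | _map_tokens_with_catalog
-- ===== SOURCE A (Python) =====
-- from typing import Dict, Iterable, List, Optional, Sequence, Tuple, Set
--
-- def _split_values(value: Optional[str]) -> List[str]:
--     """Split a multi-value cell conservatively.
--
--     FortiManager CSV typically separates multiple names by spaces. Names with
--     spaces are uncommon but possible; in that edge case users should rely on an
--     object catalog to avoid naive tokenization. Here we split by whitespace and
--     filter empties.
--     """
--     if not value:
--         return []
--     s = value.strip()
--     if not s:
--         return []
--     # Normalize whitespace to single spaces and split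
--     s = " ".join(s.split())
--     raw = [t for t in s.split(" ") if t]
--     # Pair tokens like ["VLAN201:", "Office"] into "VLAN201: Office"
--     paired: List[str] = []
--     i = 0
--     while i < len(raw):
--         tok = raw[i]
--         if tok.endswith(":") and i + 1 < len(raw):
--             paired.append(f"{tok} {raw[i+1]}")
--             i += 2
--             continue
--         if tok.endswith(":"):
--             tok = tok[:-1]
--         paired.append(tok)
--         i += 1
--     # de-duplicate while preserving order
--     seen: set = set()
--     uniq: List[str] = []
--     for t in paired:
--         if t not in seen:
--             seen.add(t)
--             uniq.append(t)
--     return uniq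
--
-- def _map_tokens_with_catalog(value: Optional[str], known_names: Set[str]) -> List[str]:
--     if not value:
--         return []
--     s = value.strip()
--     if not s or not known_names:
--         return _split_values(value)
--     # Normalize whitespace and split to raw tokens without pairing
--     raw_tokens = [t for t in " ".join(s.split()).split(" ") if t]
--     i = 0
--     out: List[str] = []
--     n = len(raw_tokens)
--     while i < n:
--         matched = None
--         # Try longest span first
--         for j in range(n, i, -1):
--             cand = " ".join(raw_tokens[i:j])
--             if cand in known_names:
--                 matched = cand
--                 i = j
--                 break
--         if matched is None:
--             # Fallback to single token
--             matched = raw_tokens[i]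
--             i += 1
--         out.append(matched)
--     # De-duplicate while preserving order
--     seen: Set[str] = set()
--     uniq: List[str] = []
--     for t in out:
--         if t not in seen:
--             seen.add(t)
--             uniq.append(t)
--     return uniq
-- ===== SOURCE B (Python) =====
-- from typing import List, Optional, Set
--
-- def _split_values(value: Optional[str]) -> List[str]:
--     # module helper, unchanged (shared by both implementations)
--     if not value:
--         return []
--     s = value.strip()
--     if not s:
--         return []
--     s = " ".join(s.split())
--     raw = [t for t in s.split(" ") if t]
--     paired: List[str] = []
--     i = 0
--     while i < len(raw):
--         tok = raw[i]
--         if tok.endswith(":") and i + 1 < len(raw):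
--             paired.append(f"{tok} {raw[i+1]}")
--             i += 2
--             continue
--         if tok.endswith(":"):
--             tok = tok[:-1]
--         paired.append(tok)
--         i += 1
--     seen: set = set()
--     uniq: List[str] = []
--     for t in paired:
--         if t not in seen:
--             seen.add(t)
--             uniq.append(t)
--     return uniq
--
-- def _map_tokens_with_catalog(value: Optional[str], known_names: Set[str]) -> List[str]:
--     # Forward incremental scan: extend the candidate one token at a time and keep
--     # the farthest match, with the window bounded by the largest word count of
--     # any catalog name (longer spans can never be catalog members).
--     if not value:
--         return []
--     s = value.strip()
--     if not s or not known_names: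
--         return _split_values(value)
--     toks = s.split()
--     max_words = max(len(n.split(" ")) for n in known_names)
--     n = len(toks)
--     out: List[str] = []
--     i = 0
--     while i < n:
--         cand = toks[i]
--         best = cand
--         best_j = i + 1
--         j = i + 1
--         while j < n and j - i < max_words:
--             cand = cand + " " + toks[j]
--             j += 1
--             if cand in known_names:
--                 best = cand
--                 best_j = j
--         out.append(best)
--         i = best_j
--     return list(dict.fromkeys(out))
-- ===== Notes on version B (the rewrite author's own statement) =====
-- stated objective: alternative
-- what changed: A's inner scan re-joins every span raw[i:j] from longest to shortest at each position; B instead extends a single candidate string forward token by token, keeping the farthest catalog match, with the window bounded by the largest word count of any catalog name.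
import Mathlib
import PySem

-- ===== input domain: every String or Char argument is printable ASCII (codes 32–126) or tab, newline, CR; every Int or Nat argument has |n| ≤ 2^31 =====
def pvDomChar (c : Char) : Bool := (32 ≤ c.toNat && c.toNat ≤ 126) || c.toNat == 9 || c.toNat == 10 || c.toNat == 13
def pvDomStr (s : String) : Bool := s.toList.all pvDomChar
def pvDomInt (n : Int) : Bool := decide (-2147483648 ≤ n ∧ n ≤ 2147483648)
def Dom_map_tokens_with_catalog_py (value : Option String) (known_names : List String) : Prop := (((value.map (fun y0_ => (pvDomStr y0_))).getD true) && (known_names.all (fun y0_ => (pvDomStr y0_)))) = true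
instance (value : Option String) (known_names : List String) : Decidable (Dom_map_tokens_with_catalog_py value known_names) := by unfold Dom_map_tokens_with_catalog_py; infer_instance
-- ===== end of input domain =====

-- B replaces A's per-position downward rescan (a fresh " ".join for every span) by a
-- single forward extension of one candidate, keeping the farthest catalog match, with
-- the window bounded by the largest word count of any catalog name; objective: alternative.
-- Both ports work on List Char (PySem.Chars) and wrap to String at the boundary.

-- ===== PORT A =====

-- shared module helper `_split_values` (identical code in Source A and Source B)

-- the seen/uniq de-duplication loop, used twice in A's module
def dedupLoopA (ts : List (List Char)) : PySem.Set (List Char) × List (List Char) :=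
  ts.foldl (fun p t => if PySem.Set.contains p.1 t then p else (PySem.Set.add p.1 t, p.2 ++ [t]))
    (PySem.Set.empty, [])

-- the token-pairing while loop of `_split_values`
-- fuel = raw.length - i bounds the remaining iterations (i grows by ≥ 1 each pass),
-- so the fuel-0 case is never reached from the initial call
def pairLoop (raw : List (List Char)) : Nat → Nat → List (List Char) → List (List Char)
  | 0, _, acc => acc
  | fuel + 1, i, acc =>
    if i < raw.length then
      let tok := raw.getD i []   -- raw[i]; i < len(raw) by the loop guard
      if PySem.Chars.endswith tok [':'] ∧ i + 1 < raw.length then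
        pairLoop raw fuel (i + 2) (acc ++ [tok ++ [' '] ++ raw.getD (i + 1) []])
      else
        let tok := if PySem.Chars.endswith tok [':'] then PySem.Chars.slice tok none (some (-1)) else tok
        pairLoop raw fuel (i + 1) (acc ++ [tok])
    else acc

def split_values_py (value : Option String) : List String :=
  match value with
  | none => []
  | some v =>
    if v.toList = [] then []
    else
      let s := PySem.Chars.strip v.toList
      if s = [] then []
      else
        let s2 := PySem.Chars.join [' '] (PySem.Chars.split₀ s)
        let raw := (PySem.Chars.splitOn s2 [' ']).filter (fun t => t ≠ [])
        let paired := pairLoop raw raw.length 0 []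
        ((dedupLoopA paired).2).map String.ofList

-- A's inner `for j in range(n, i, -1): … break` scan
def aScan (raw knownL : List (List Char)) (i : Nat) : Nat → Option (List Char × Nat)
  | 0 => none
  | j + 1 =>
    if i < j + 1 then
      let cand := PySem.Chars.join [' '] (PySem.List.slice raw (some (i : Int)) (some ((j : Int) + 1)))
      if PySem.Set.contains knownL cand then some (cand, j + 1) else aScan raw knownL i j
    else none

-- A's outer `while i < n` loop; fuel = n - i bounds the remaining iterations
-- (i grows by ≥ 1 each pass), so the fuel-0 case is never reached
def aLoop (raw knownL : List (List Char)) : Nat → Nat → List (List Char) → List (List Char)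
  | 0, _, out => out
  | fuel + 1, i, out =>
    if i < raw.length then
      match aScan raw knownL i raw.length with
      | some (c, j) => aLoop raw knownL fuel j (out ++ [c])
      | none => aLoop raw knownL fuel (i + 1) (out ++ [raw.getD i []])   -- raw[i]; i < n by the guard
    else out

def map_tokens_with_catalog_py (value : Option String) (known_names : List String) : List String :=
  match value with
  | none => []
  | some v =>
    if v.toList = [] then []
    else
      let s := PySem.Chars.strip v.toList
      if s = [] ∨ known_names = [] then split_values_py value
      else
        let raw := (PySem.Chars.splitOn (PySem.Chars.join [' '] (PySem.Chars.split₀ s)) [' ']).filter (fun t => t ≠ [])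
        let knownL := known_names.map String.toList
        ((dedupLoopA (aLoop raw knownL raw.length 0 [])).2).map String.ofList

-- ===== PORT B =====

-- B's inner `while j < n and j - i < max_words` forward-extension scan;
-- fuel = n - j bounds the remaining iterations, so fuel 0 is never reached with the guard true
def bScan (toks knownL : List (List Char)) (maxw n i : Nat) :
    Nat → Nat → List Char → List Char → Nat → List Char × Nat
  | 0, _, _, best, bestj => (best, bestj)
  | fuel + 1, j, cand, best, bestj =>
    if j < n ∧ j - i < maxw then
      let cand' := cand ++ [' '] ++ toks.getD j []   -- toks[j]; j < n by the loop guard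
      if PySem.Set.contains knownL cand' then bScan toks knownL maxw n i fuel (j + 1) cand' cand' (j + 1)
      else bScan toks knownL maxw n i fuel (j + 1) cand' best bestj
    else (best, bestj)

-- B's outer `while i < n` loop; fuel = n - i bounds the remaining iterations
-- (i advances to best_j ≥ i + 1 each pass), so the fuel-0 case is never reached
def bLoop (toks knownL : List (List Char)) (maxw : Nat) : Nat → Nat → List (List Char) → List (List Char)
  | 0, _, out => out
  | fuel + 1, i, out =>
    if i < toks.length then
      let t := toks.getD i []   -- toks[i]; i < n by the guard
      let r := bScan toks knownL maxw toks.length i (toks.length - (i + 1)) (i + 1) t t (i + 1)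
      bLoop toks knownL maxw fuel r.2 (out ++ [r.1])
    else out

def map_tokens_with_catalog_py_alt (value : Option String) (known_names : List String) : List String :=
  match value with
  | none => []
  | some v =>
    if v.toList = [] then []
    else
      let s := PySem.Chars.strip v.toList
      if s = [] ∨ known_names = [] then split_values_py value
      else
        let toks := PySem.Chars.split₀ s
        let knownL := known_names.map String.toList
        -- max(len(n.split(" ")) for n in known_names): a fold, the set is nonempty here
        let maxw := (known_names.map (fun nm => (PySem.Chars.splitOn nm.toList [' ']).length)).foldl max 0
        (PySem.List.dedup (bLoop toks knownL maxw toks.length 0 [])).map String.ofList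

-- ===== PRECONDITION & SPEC =====
def Spec_map_tokens_with_catalog_py (value : Option String) (known_names : List String) (out : List String) : Prop := out = map_tokens_with_catalog_py_alt value known_names
instance (value : Option String) (known_names : List String) (out : List String) : Decidable (Spec_map_tokens_with_catalog_py value known_names out) := by unfold Spec_map_tokens_with_catalog_py; infer_instance

-- ===== CLAIM (what is proved, stated in full; the proofs are below) =====
def Claim_equal_map_tokens_with_catalog_py : Prop := ∀ (value : Option String) (known_names : List String), Dom_map_tokens_with_catalog_py value known_names → Spec_map_tokens_with_catalog_py value known_names (map_tokens_with_catalog_py value known_names)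

-- ===== LEMMAS AND PROOFS =====

-- ---- generic facts about split₀ / splitOn / join ----

theorem split0_go_sound :
    ∀ (s cur : List Char) (acc : List (List Char)),
      (∀ t ∈ acc, t ≠ [] ∧ ∀ c ∈ t, PySem.Chars.isspace c = false) →
      (∀ c ∈ cur, PySem.Chars.isspace c = false) →
      ∀ t ∈ PySem.Chars.split₀.go s cur acc, t ≠ [] ∧ ∀ c ∈ t, PySem.Chars.isspace c = false := by
  intro s
  induction s with
  | nil =>
    intro cur acc hacc hcur t ht
    simp only [PySem.Chars.split₀.go] at ht
    split at ht
    · exact hacc t (by simpa using ht)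
    · rename_i hne
      simp only [List.mem_reverse, List.mem_cons] at ht
      rcases ht with h | h
      · subst h
        refine ⟨by simpa [List.isEmpty_iff] using hne, ?_⟩
        intro c hc
        exact hcur c (List.mem_reverse.1 hc)
      · exact hacc t h
  | cons c rest ih =>
    intro cur acc hacc hcur t ht
    simp only [PySem.Chars.split₀.go] at ht
    split at ht
    · split at ht
      · exact ih [] acc hacc (by simp) t ht
      · rename_i hsp hne
        refine ih [] (cur.reverse :: acc) ?_ (by simp) t ht
        intro u hu
        rcases List.mem_cons.1 hu with h | h
        · subst h
          refine ⟨by simpa [List.isEmpty_iff] using hne, ?_⟩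
          intro d hd
          exact hcur d (List.mem_reverse.1 hd)
        · exact hacc u h
    · rename_i hsp
      refine ih (c :: cur) acc hacc ?_ t ht
      intro d hd
      rcases List.mem_cons.1 hd with h | h
      · subst h; simpa using hsp
      · exact hcur d h

theorem split0_pieces (s : List Char) :
    ∀ t ∈ PySem.Chars.split₀ s, t ≠ [] ∧ ∀ c ∈ t, PySem.Chars.isspace c = false := by
  exact split0_go_sound s [] [] (by simp) (by simp)

theorem splitOn_go_chars (p : List Char) (hp : ∀ c ∈ p, c ≠ ' ') :
    ∀ (l cur : List Char) (acc : List (List Char)) (fuel : Nat),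
      PySem.Chars.splitOn.go [' '] (p.length + fuel + 1) (p ++ l) cur acc =
        PySem.Chars.splitOn.go [' '] (fuel + 1) l (p.reverse ++ cur) acc := by
  induction p with
  | nil => intro l cur acc fuel; simp
  | cons c p' ih =>
    intro l cur acc fuel
    have hc : c ≠ ' ' := hp c (by simp)
    have hpre : [' '].isPrefixOf (c :: (p' ++ l)) = false := by
      simp [List.isPrefixOf]
      exact fun h => absurd h.symm hc
    have hL : (c :: p').length + fuel + 1 = (p'.length + fuel + 1) + 1 := by
      simp; omega
    rw [hL]
    rw [show ((c :: p') ++ l) = c :: (p' ++ l) from rfl]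
    rw [show PySem.Chars.splitOn.go [' '] ((p'.length + fuel + 1) + 1) (c :: (p' ++ l)) cur acc =
        PySem.Chars.splitOn.go [' '] (p'.length + fuel + 1) (p' ++ l) (c :: cur) acc by
      simp only [PySem.Chars.splitOn.go, hpre]; rfl]
    rw [ih (fun d hd => hp d (by simp [hd])) l (c :: cur) acc fuel]
    simp

theorem splitOn_go_join (ps : List (List Char)) (hne : ps ≠ [])
    (hsf : ∀ t ∈ ps, ∀ c ∈ t, c ≠ ' ') :
    ∀ (acc : List (List Char)) (fuel : Nat),
      PySem.Chars.splitOn.go [' '] ((PySem.Chars.join [' '] ps).length + fuel + 1)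
        (PySem.Chars.join [' '] ps) [] acc = acc.reverse ++ ps := by
  induction ps with
  | nil => exact absurd rfl hne
  | cons p rest ih =>
    intro acc fuel
    match rest with
    | [] =>
      rw [PySem.Chars.join_singleton]
      rw [show PySem.Chars.splitOn.go [' '] (p.length + fuel + 1) p [] acc =
          PySem.Chars.splitOn.go [' '] (fuel + 1) [] (p.reverse ++ []) acc by
        have := splitOn_go_chars p (fun c hc => hsf p (by simp) c hc) [] [] acc fuel
        simpa using this]
      simp [PySem.Chars.splitOn.go]
    | r :: rest' =>
      have hjoin : PySem.Chars.join [' '] (p :: r :: rest') =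
          p ++ (' ' :: PySem.Chars.join [' '] (r :: rest')) := by
        rw [PySem.Chars.join_cons_cons]; simp
      set jr := PySem.Chars.join [' '] (r :: rest') with hjr
      have hlen : (PySem.Chars.join [' '] (p :: r :: rest')).length + fuel + 1 =
          p.length + (jr.length + fuel + 1) + 1 := by
        rw [hjoin]; simp; omega
      rw [hlen, hjoin]
      rw [splitOn_go_chars p (fun c hc => hsf p (by simp) c hc) (' ' :: jr) [] acc
        (jr.length + fuel + 1)]
      rw [show PySem.Chars.splitOn.go [' '] (jr.length + fuel + 1 + 1) (' ' :: jr)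
          (p.reverse ++ []) acc =
          PySem.Chars.splitOn.go [' '] (jr.length + fuel + 1) jr [] ((p.reverse ++ []).reverse :: acc) by
        simp only [PySem.Chars.splitOn.go, List.isPrefixOf]
        simp]
      have hrec := ih (by simp) (fun u hu c hc => hsf u (by simp [hu]) c hc)
        ((p.reverse ++ []).reverse :: acc) fuel
      rw [show jr.length + fuel + 1 = jr.length + fuel + 1 from rfl]
      rw [hrec]
      simp

theorem splitOn_join (ps : List (List Char)) (hne : ps ≠ [])
    (hsf : ∀ t ∈ ps, ∀ c ∈ t, c ≠ ' ') :
    PySem.Chars.splitOn (PySem.Chars.join [' '] ps) [' '] = ps := by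
  rw [PySem.Chars.splitOn]
  have := splitOn_go_join ps hne hsf [] 0
  simpa using this

theorem splitOn_go_ne_nil (sep : List Char) :
    ∀ (fuel : Nat) (l cur : List Char) (acc : List (List Char)),
      PySem.Chars.splitOn.go sep fuel l cur acc ≠ [] := by
  intro fuel
  induction fuel with
  | zero =>
    intro l cur acc
    match l with
    | [] => simp [PySem.Chars.splitOn.go]
    | c :: rest => simp [PySem.Chars.splitOn.go]
  | succ fuel ih =>
    intro l cur acc
    match l with
    | [] => simp [PySem.Chars.splitOn.go]
    | c :: rest =>
      simp only [PySem.Chars.splitOn.go]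
      split
      · exact ih _ _ _
      · exact ih _ _ _

theorem splitOn_ne_nil (s sep : List Char) : PySem.Chars.splitOn s sep ≠ [] := by
  rw [PySem.Chars.splitOn]
  exact splitOn_go_ne_nil sep _ _ _ _

theorem join_snoc (ps : List (List Char)) (q : List Char) (h : ps ≠ []) :
    PySem.Chars.join [' '] (ps ++ [q]) = PySem.Chars.join [' '] ps ++ [' '] ++ q := by
  induction ps with
  | nil => exact absurd rfl h
  | cons p rest ih =>
    match rest with
    | [] => simp [PySem.Chars.join_cons_cons, PySem.Chars.join_singleton]
    | r :: rest' =>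
      have hni : r :: rest' ≠ [] := by simp
      calc PySem.Chars.join [' '] (p :: (r :: rest' ++ [q]))
          = p ++ [' '] ++ PySem.Chars.join [' '] (r :: rest' ++ [q]) := by
            match rest' with
            | [] => exact PySem.Chars.join_cons_cons _ _ _ _
            | x :: xs => exact PySem.Chars.join_cons_cons _ _ _ _
        _ = p ++ [' '] ++ (PySem.Chars.join [' '] (r :: rest') ++ [' '] ++ q) := by rw [ih hni]
        _ = PySem.Chars.join [' '] (p :: r :: rest') ++ [' '] ++ q := by
            rw [PySem.Chars.join_cons_cons]; simp

-- the raw-token lists of the two ports coincide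
theorem raw_eq_toks (s : List Char) :
    (PySem.Chars.splitOn (PySem.Chars.join [' '] (PySem.Chars.split₀ s)) [' ']).filter
        (fun t => t ≠ []) = PySem.Chars.split₀ s := by
  match hps : PySem.Chars.split₀ s with
  | [] =>
    rw [PySem.Chars.join_nil]
    decide
  | p :: rest =>
    have hpieces := split0_pieces s
    rw [hps] at hpieces
    rw [splitOn_join (p :: rest) (by simp) ?hsf]
    case hsf =>
      intro u hu c hc hce
      have := (hpieces u hu).2 c hc
      rw [hce] at this
      exact absurd this (by decide)
    rw [List.filter_eq_self.2]
    intro u hu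
    simpa using (hpieces u hu).1

-- ---- the greedy-match reference function ----

-- greatest k in (i, j] with C k (what both inner scans compute)
def bestK (C : Nat → Bool) (i : Nat) : Nat → Option Nat
  | 0 => none
  | j + 1 => if i < j + 1 then (if C (j + 1) then some (j + 1) else bestK C i j) else none

theorem bestK_empty (C : Nat → Bool) : ∀ {i W : Nat}, W ≤ i → bestK C i W = none := by
  intro i W h
  match W with
  | 0 => rfl
  | W + 1 => rw [bestK, if_neg (by omega)]

theorem bestK_lower_succ (C : Nat → Bool) :
    ∀ {j W : Nat}, j < W →
      bestK C j W =
        (match bestK C (j + 1) W with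
          | some k => some k
          | none => if C (j + 1) then some (j + 1) else none) := by
  intro j W
  induction W with
  | zero => omega
  | succ W ih =>
    intro hjW
    by_cases hW : j < W
    · rw [bestK, if_pos (by omega)]
      rw [show bestK C (j + 1) (W + 1) = if C (W + 1) then some (W + 1) else bestK C (j + 1) W by
        rw [bestK, if_pos (by omega)]]
      by_cases hC : C (W + 1)
      · simp [hC]
      · simp only [hC, if_false, Bool.false_eq_true]
        exact ih hW
    · have hjW' : j = W := by omega
      subst hjW'
      rw [bestK, if_pos (by omega), bestK_empty C (le_refl j)]
      rw [show bestK C (j + 1) (j + 1) = none from bestK_empty C (le_refl (j + 1))]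

theorem bestK_shrink (C : Nat → Bool) :
    ∀ {i W n : Nat}, W ≤ n → (∀ k, W < k → k ≤ n → C k = false) →
      bestK C i n = bestK C i W := by
  intro i W n
  induction n with
  | zero => intro h _; interval_cases W; rfl
  | succ n ih =>
    intro hWn hC
    by_cases hW : W = n + 1
    · subst hW; rfl
    · have hWn' : W ≤ n := by omega
      rw [bestK]
      split_ifs with h1 h2
      · rw [hC (n + 1) (by omega) (le_refl _)] at h2; simp at h2
      · exact ih hWn' (fun k a b => hC k a (by omega))
      · rw [bestK_empty C (show W ≤ i by omega)]

-- ---- span candidates ----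

theorem contains_iff_mem (knownL : List (List Char)) (c : List Char) :
    PySem.Set.contains knownL c = true ↔ c ∈ knownL := by
  simp [PySem.Set.contains]


def slK (toks : List (List Char)) (i k : Nat) : List (List Char) := (toks.drop i).take (k - i)

def candF (toks : List (List Char)) (i k : Nat) : List Char :=
  PySem.Chars.join [' '] (slK toks i k)

def CF (toks knownL : List (List Char)) (i : Nat) (k : Nat) : Bool :=
  PySem.Set.contains knownL (candF toks i k)

theorem slK_ne_nil (toks : List (List Char)) {i k : Nat} (h1 : i < k) (h2 : i < toks.length) :
    slK toks i k ≠ [] := by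
  apply List.ne_nil_of_length_pos
  simp only [slK, List.length_take, List.length_drop]
  omega

theorem slK_length (toks : List (List Char)) {i k : Nat} (h1 : i ≤ k) (h2 : k ≤ toks.length) :
    (slK toks i k).length = k - i := by
  simp only [slK, List.length_take, List.length_drop]
  omega

theorem slK_subset (toks : List (List Char)) (i k : Nat) : ∀ t ∈ slK toks i k, t ∈ toks := by
  intro t ht
  exact List.mem_of_mem_drop (List.mem_of_mem_take ht)

theorem candF_one (toks : List (List Char)) {i : Nat} (h : i < toks.length) :
    candF toks i (i + 1) = toks.getD i [] := by
  have hd : toks.drop i = toks[i] :: toks.drop (i + 1) := List.drop_eq_getElem_cons h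
  simp only [candF, slK, hd, Nat.add_sub_cancel_left, List.take_succ_cons, List.take_zero]
  rw [PySem.Chars.join_singleton, List.getD_eq_getElem toks [] h]

theorem candF_succ (toks : List (List Char)) {i j : Nat} (h1 : i < j) (h2 : j < toks.length) :
    candF toks i (j + 1) = candF toks i j ++ [' '] ++ toks.getD j [] := by
  have hsl : slK toks i (j + 1) = slK toks i j ++ [toks.getD j []] := by
    simp only [slK, show j + 1 - i = (j - i) + 1 by omega, List.take_succ]
    rw [List.getElem?_drop, show i + (j - i) = j by omega,
      List.getElem?_eq_getElem h2, List.getD_eq_getElem toks [] h2]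
    rfl
  rw [candF, hsl, join_snoc _ _ (slK_ne_nil toks h1 (by omega))]
  rfl

-- ---- the two inner scans against bestK ----

theorem aScan_eq_bestK (toks knownL : List (List Char)) (i : Nat) :
    ∀ j, aScan toks knownL i j =
      (bestK (CF toks knownL i) i j).map (fun k => (candF toks i k, k)) := by
  intro j
  induction j with
  | zero => rfl
  | succ j ih =>
    rw [aScan, bestK]
    by_cases hij : i < j + 1
    · rw [if_pos hij, if_pos hij]
      have hsl : PySem.List.slice toks (some (i : Int)) (some ((j : Int) + 1)) =
          slK toks i (j + 1) := by
        rw [show ((j : Int) + 1) = ((j + 1 : Nat) : Int) by push_cast; ring]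
        rw [PySem.List.slice_natCast]
        rfl
      simp only [hsl]
      by_cases hC : CF toks knownL i (j + 1)
      · rw [if_pos (by exact hC), if_pos hC]
        rfl
      · rw [if_neg (by simpa [CF, candF, contains_iff_mem] using hC), if_neg (by simpa using hC)]
        exact ih
    · rw [if_neg hij, if_neg hij]
      rfl

theorem bScan_eq_bestK (toks knownL : List (List Char)) (maxw i : Nat) :
    ∀ (fuel j : Nat) (best : List Char) (bestj : Nat),
      toks.length - j ≤ fuel → i < j → j ≤ toks.length →
      bScan toks knownL maxw toks.length i fuel j (candF toks i j) best bestj =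
        (match bestK (CF toks knownL i) j (min toks.length (i + maxw)) with
          | some k => (candF toks i k, k)
          | none => (best, bestj)) := by
  intro fuel
  induction fuel with
  | zero =>
    intro j best bestj hfuel hij hjn
    have hj : j = toks.length := by omega
    subst hj
    rw [bestK_empty _ (show min toks.length (i + maxw) ≤ toks.length by omega)]
    rfl
  | succ fuel ih =>
    intro j best bestj hfuel hij hjn
    rw [bScan]
    by_cases hcond : j < toks.length ∧ j - i < maxw
    · rw [if_pos hcond]
      dsimp only
      rw [show candF toks i j ++ [' '] ++ toks.getD j [] = candF toks i (j + 1) from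
        (candF_succ toks hij hcond.1).symm]
      have hjW : j < min toks.length (i + maxw) := by omega
      rw [bestK_lower_succ _ hjW]
      by_cases hC : CF toks knownL i (j + 1)
      · rw [if_pos (show PySem.Set.contains knownL (candF toks i (j + 1)) = true from hC)]
        rw [ih (j + 1) (candF toks i (j + 1)) (j + 1) (by omega) (by omega) (by omega)]
        cases hbk : bestK (CF toks knownL i) (j + 1) (min toks.length (i + maxw)) with
        | some k => rfl
        | none => simp [hC]
      · rw [if_neg (show ¬ PySem.Set.contains knownL (candF toks i (j + 1)) = true by
          simpa [CF, contains_iff_mem] using hC)]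
        rw [ih (j + 1) best bestj (by omega) (by omega) (by omega)]
        cases hbk : bestK (CF toks knownL i) (j + 1) (min toks.length (i + maxw)) with
        | some k => rfl
        | none => simp [hC]
    · rw [if_neg hcond]
      rw [bestK_empty _ (show min toks.length (i + maxw) ≤ j by omega)]

-- ---- the catalog word-count bound ----

theorem CF_bound (toks knownL : List (List Char)) (maxw : Nat)
    (htoks : ∀ t ∈ toks, t ≠ [] ∧ ∀ c ∈ t, PySem.Chars.isspace c = false)
    (hmax : ∀ c ∈ knownL, (PySem.Chars.splitOn c [' ']).length ≤ maxw) :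
    ∀ i k, i < k → k ≤ toks.length → CF toks knownL i k = true → k ≤ i + maxw := by
  intro i k hik hk hCF
  have hmem : candF toks i k ∈ knownL := (contains_iff_mem knownL _).1 hCF
  have hb := hmax _ hmem
  have hsp : PySem.Chars.splitOn (candF toks i k) [' '] = slK toks i k := by
    apply splitOn_join
    · exact slK_ne_nil toks hik (by omega)
    · intro u hu c hc hce
      have := (htoks u (slK_subset toks i k u hu)).2 c hc
      rw [hce] at this
      exact absurd this (by decide)
  unfold candF at hb hsp
  rw [hsp] at hb
  rw [slK_length toks (by omega) hk] at hb
  omega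

theorem aScan_some_bounds (raw knownL : List (List Char)) (i : Nat) :
    ∀ j c j', aScan raw knownL i j = some (c, j') → i < j' ∧ j' ≤ j := by
  intro j
  induction j with
  | zero => intro c j' h; simp [aScan] at h
  | succ j ih =>
    intro c j' h
    by_cases hij : i < j + 1
    · simp only [aScan, if_pos hij] at h
      split at h
      · simp only [Option.some.injEq, Prod.mk.injEq] at h; omega
      · have := ih c j' h; omega
    · simp [aScan, hij] at h

-- ---- one step of each outer loop agrees ----

theorem step_eq (toks knownL : List (List Char)) (maxw i : Nat)
    (htoks : ∀ t ∈ toks, t ≠ [] ∧ ∀ c ∈ t, PySem.Chars.isspace c = false)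
    (hmax : ∀ c ∈ knownL, (PySem.Chars.splitOn c [' ']).length ≤ maxw)
    (hmw : 1 ≤ maxw) (hi : i < toks.length) :
    (match aScan toks knownL i toks.length with
      | some (c, j) => (c, j)
      | none => (toks.getD i [], i + 1)) =
      bScan toks knownL maxw toks.length i (toks.length - (i + 1)) (i + 1)
        (toks.getD i []) (toks.getD i []) (i + 1) := by
  rw [aScan_eq_bestK toks knownL i toks.length]
  have hW1 : i < min toks.length (i + maxw) := by omega
  have hshr : bestK (CF toks knownL i) i toks.length =
      bestK (CF toks knownL i) i (min toks.length (i + maxw)) := by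
    apply bestK_shrink _ (by omega)
    intro k hWk hkn
    by_cases hCk : CF toks knownL i k
    · exfalso
      have hle := CF_bound toks knownL maxw htoks hmax i k (by omega) hkn hCk
      omega
    · simpa using hCk
  rw [hshr, bestK_lower_succ _ hW1]
  rw [show toks.getD i [] = candF toks i (i + 1) from (candF_one toks hi).symm]
  rw [bScan_eq_bestK toks knownL maxw i (toks.length - (i + 1)) (i + 1)
    (candF toks i (i + 1)) (i + 1) (by omega) (by omega) (by omega)]
  cases hbk : bestK (CF toks knownL i) (i + 1) (min toks.length (i + maxw)) with
  | some k => rfl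
  | none =>
    by_cases hC1 : CF toks knownL i (i + 1)
    · simp [hC1]
    · simp [hC1]

-- ---- the outer loops agree ----

theorem loop_eq (toks knownL : List (List Char)) (maxw : Nat)
    (htoks : ∀ t ∈ toks, t ≠ [] ∧ ∀ c ∈ t, PySem.Chars.isspace c = false)
    (hmax : ∀ c ∈ knownL, (PySem.Chars.splitOn c [' ']).length ≤ maxw)
    (hmw : 1 ≤ maxw) :
    ∀ (fuel i : Nat) (out : List (List Char)), toks.length - i ≤ fuel →
      aLoop toks knownL fuel i out = bLoop toks knownL maxw fuel i out := by
  intro fuel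
  induction fuel with
  | zero => intro i out hfuel; rfl
  | succ fuel ih =>
    intro i out hfuel
    rw [aLoop, bLoop]
    by_cases hi : i < toks.length
    · rw [if_pos hi, if_pos hi]
      have hstep := step_eq toks knownL maxw i htoks hmax hmw hi
      cases hscan : aScan toks knownL i toks.length with
      | none =>
        rw [hscan] at hstep
        dsimp only
        rw [← hstep]
        exact ih (i + 1) _ (by omega)
      | some cj =>
        obtain ⟨c, j⟩ := cj
        rw [hscan] at hstep
        dsimp only
        rw [← hstep]
        have hij := aScan_some_bounds toks knownL i toks.length c j hscan
        exact ih j _ (by omega)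
    · rw [if_neg hi, if_neg hi]

-- ---- the two de-duplications agree ----

theorem dedup_fold (ts : List (List Char)) :
    ∀ seen : PySem.Set (List Char),
      (ts.foldl (fun p t => if PySem.Set.contains p.1 t then p
          else (PySem.Set.add p.1 t, p.2 ++ [t])) (seen, seen)).2 =
        ts.foldl PySem.Set.add seen := by
  induction ts with
  | nil => intro seen; rfl
  | cons t ts ih =>
    intro seen
    have hstep : (if PySem.Set.contains seen t then (seen, seen)
        else (PySem.Set.add seen t, seen ++ [t])) = (PySem.Set.add seen t, PySem.Set.add seen t) := by
      by_cases hc : t ∈ seen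
      · simp [hc, PySem.Set.add, PySem.Set.contains]
      · simp [hc, PySem.Set.add, PySem.Set.contains]
    simp only [List.foldl_cons, hstep]
    exact ih (PySem.Set.add seen t)

theorem dedupLoopA_eq (ts : List (List Char)) : (dedupLoopA ts).2 = PySem.List.dedup ts := by
  rw [PySem.List.dedup_eq_ofList, PySem.Set.ofList_eq_foldl, dedupLoopA,
    show (PySem.Set.empty : PySem.Set (List Char)) = [] from rfl]
  exact dedup_fold ts []

-- ---- maxw facts ----

theorem maxw_ge (known_names : List String) (hk : known_names ≠ []) :
    1 ≤ (known_names.map (fun nm => (PySem.Chars.splitOn nm.toList [' ']).length)).foldl max 0 := by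
  match known_names with
  | [] => exact absurd rfl hk
  | nm :: rest =>
    have hmem : (PySem.Chars.splitOn nm.toList [' ']).length ∈
        ((nm :: rest).map (fun nm => (PySem.Chars.splitOn nm.toList [' ']).length)) := by
      simp
    have := (PySem.List.le_foldl_max ((nm :: rest).map
      (fun nm => (PySem.Chars.splitOn nm.toList [' ']).length)) 0).2 _ hmem
    have hpos : 0 < (PySem.Chars.splitOn nm.toList [' ']).length :=
      List.length_pos_of_ne_nil (splitOn_ne_nil _ _)
    omega

theorem maxw_bound (known_names : List String) :
    ∀ c ∈ known_names.map String.toList,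
      (PySem.Chars.splitOn c [' ']).length ≤
        (known_names.map (fun nm => (PySem.Chars.splitOn nm.toList [' ']).length)).foldl max 0 := by
  intro c hc
  obtain ⟨nm, hnm, rfl⟩ := List.mem_map.1 hc
  exact (PySem.List.le_foldl_max _ 0).2 _ (List.mem_map.2 ⟨nm, hnm, rfl⟩)

-- ===== VERDICT (by name: the statement is the Claim_ definition above) =====
theorem map_tokens_with_catalog_py_spec : Claim_equal_map_tokens_with_catalog_py := by
  intro value known_names _dom
  unfold Spec_map_tokens_with_catalog_py
  unfold map_tokens_with_catalog_py map_tokens_with_catalog_py_alt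
  match value with
  | none => rfl
  | some v =>
    dsimp only
    by_cases hv : v.toList = []
    · rw [if_pos hv, if_pos hv]
    · rw [if_neg hv, if_neg hv]
      by_cases hbr : PySem.Chars.strip v.toList = [] ∨ known_names = []
      · rw [if_pos hbr, if_pos hbr]
      · rw [if_neg hbr, if_neg hbr]
        have hk : known_names ≠ [] := by tauto
        have htoks := split0_pieces (PySem.Chars.strip v.toList)
        rw [raw_eq_toks (PySem.Chars.strip v.toList)]
        rw [loop_eq (PySem.Chars.split₀ (PySem.Chars.strip v.toList))
          (known_names.map String.toList) _ htoks (maxw_bound known_names)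
          (maxw_ge known_names hk)
          (PySem.Chars.split₀ (PySem.Chars.strip v.toList)).length 0 [] (by omega)]
        rw [dedupLoopA_eq]
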